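-- pv_equiv track=rewrite | github.com/waltersteven/bigdata_taller4 | main.py | map_rdd
-- ===== SOURCE A (Python) =====
-- def map_rdd(especie, x):
--     indices = []
--     for i in range(0, len(especie)):
--         if especie[i] == 1: indices.append(i)
--
--     resp = [int(x[1])]
--     for i in indices:
--         resp.append(int(x[i + 2]))
--
--     return resp
-- ===== SOURCE B (Python) =====
-- def map_rdd(especie, x):
--     resp = [int(x[1])]
--     for e, s in zip(especie, x[2:]):
--         if e == 1:
--             resp.append(int(s))
--     return resp
-- ===== Notes on version B (the rewrite author's own statement) =====
-- stated objective: simpler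
-- what changed: Instead of building an index table and then indexing back into x with i+2 arithmetic, B pairs the mask directly with the shifted data via zip(especie, x[2:]) and converts selected elements in one pass, eliminating all index computation and the intermediate indices list.
import Mathlib
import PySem

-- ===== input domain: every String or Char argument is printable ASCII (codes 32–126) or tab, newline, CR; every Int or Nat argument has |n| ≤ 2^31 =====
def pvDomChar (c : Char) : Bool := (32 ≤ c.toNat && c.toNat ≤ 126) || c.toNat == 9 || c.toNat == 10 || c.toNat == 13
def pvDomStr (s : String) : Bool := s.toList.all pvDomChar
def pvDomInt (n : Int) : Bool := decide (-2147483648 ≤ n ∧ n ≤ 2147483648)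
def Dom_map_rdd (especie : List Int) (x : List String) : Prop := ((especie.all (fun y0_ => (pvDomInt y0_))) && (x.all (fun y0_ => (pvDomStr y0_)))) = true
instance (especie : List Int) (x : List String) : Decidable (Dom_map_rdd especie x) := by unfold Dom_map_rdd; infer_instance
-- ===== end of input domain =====

-- B replaces A's index table + second indexing loop by a single pass over zip(especie, x[2:]),
-- removing all index arithmetic; simpler decomposition, same cost.
-- (Where A raises, e.g. IndexError on an out-of-range selected position, nothing is claimed.)


-- int(x[i]) under Pre_ (inside Pre_ the lookup and parse always succeed; none only outside it)
def pvToInt (x : List String) (i : Int) : Int :=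
  ((PySem.List.pyGet? x i).bind PySem.Int.ofStr?).getD 0

-- int(s) under Pre_
def pvParse (s : String) : Int := (PySem.Int.ofStr? s).getD 0

-- ===== PORT A =====
def map_rdd (especie : List Int) (x : List String) : List Int :=
  let indices : List Int :=
    (PySem.List.pyRange 0 especie.length 1).foldl
      (fun acc i => if PySem.List.pyGetD especie i 0 == 1 then acc ++ [i] else acc) []
  let resp : List Int := [pvToInt x 1]
  indices.foldl (fun r i => r ++ [pvToInt x (i + 2)]) resp

-- ===== PORT B =====
def map_rdd_alt (especie : List Int) (x : List String) : List Int :=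
  (especie.zip (PySem.List.slice x (some 2) none)).foldl
    (fun r p => if p.1 == 1 then r ++ [pvParse p.2] else r)
    [pvToInt x 1]

-- ===== PRECONDITION & SPEC =====
-- Pre_ excludes exactly the inputs where Python A raises: x[1] missing or not int-parsable,
-- or some selected x[i+2] missing or not int-parsable.
def Pre_map_rdd (especie : List Int) (x : List String) : Prop :=
  (((PySem.List.pyGet? x 1).bind PySem.Int.ofStr?).isSome = true) ∧
  ∀ p ∈ PySem.List.enumerate especie, p.2 = 1 →
    ((PySem.List.pyGet? x (p.1 + 2)).bind PySem.Int.ofStr?).isSome = true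
instance (especie : List Int) (x : List String) : Decidable (Pre_map_rdd especie x) := by
  unfold Pre_map_rdd; infer_instance

def pvWitness_map_rdd : List Int × List String := ([1, 0, 1], ["a", "5", "10", "x", "20"])

def Spec_map_rdd (especie : List Int) (x : List String) (out : List Int) : Prop := out = map_rdd_alt especie x
instance (especie : List Int) (x : List String) (out : List Int) : Decidable (Spec_map_rdd especie x out) := by unfold Spec_map_rdd; infer_instance

-- ===== CLAIM (what is proved, stated in full; the proofs are below) =====
def Claim_equal_map_rdd : Prop := ∀ (especie : List Int) (x : List String), Dom_map_rdd especie x → Pre_map_rdd especie x → Spec_map_rdd especie x (map_rdd especie x)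

-- ===== LEMMAS AND PROOFS =====

-- A as a filtered map over the enumerated mask
lemma mapA_eq (especie : List Int) (x : List String) :
    map_rdd especie x =
      pvToInt x 1 ::
        ((PySem.List.enumerate especie).filter (fun p => p.2 == 1)).map
          (fun p => pvToInt x (p.1 + 2)) := by
  unfold map_rdd
  rw [PySem.List.enumerate_eq_map_pyRange especie 0]
  simp only [PySem.List.foldl_append_if, PySem.List.foldl_append_singleton_eq_map,
    List.filter_map, List.map_map, PySem.List.len]
  simp [Function.comp_def]

-- B as a filtered map over the zipped pairs
lemma mapB_eq (especie : List Int) (x : List String) :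
    map_rdd_alt especie x =
      pvToInt x 1 ::
        ((especie.zip (x.drop 2)).filter (fun p => p.1 == 1)).map (fun p => pvParse p.2) := by
  unfold map_rdd_alt
  rw [show ((2 : Int)) = ((2 : Nat) : Int) by norm_num, PySem.List.slice_from_natCast]
  rw [PySem.List.foldl_append_if]
  simp

-- core: under Pre_'s in-range condition the two filtered maps coincide
lemma core (especie : List Int) (x : List String) :
    ∀ (k : Nat),
      (∀ p ∈ PySem.List.enumerate especie (k : Int), p.2 = 1 →
          ((PySem.List.pyGet? x (p.1 + 2)).bind PySem.Int.ofStr?).isSome = true) →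
      ((PySem.List.enumerate especie (k : Int)).filter (fun p => p.2 == 1)).map
          (fun p => pvToInt x (p.1 + 2))
        = ((especie.zip (x.drop (k + 2))).filter (fun p => p.1 == 1)).map
            (fun p => pvParse p.2) := by
  induction especie with
  | nil => intro k h; simp [PySem.List.enumerate_nil]
  | cons e es ih =>
    intro k h
    rw [PySem.List.enumerate_cons]
    rcases hd : x.drop (k + 2) with _ | ⟨y, rest⟩
    · -- x has no element at position k+2 (or beyond)
      have hlen : x.length ≤ k + 2 := List.drop_eq_nil_iff.mp hd
      have hnone : ∀ (j : Nat), k ≤ j → (PySem.List.pyGet? x ((j : Int) + 2)) = none := by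
        intro j hj
        have : ((j : Int) + 2) = (((j + 2 : Nat)) : Int) := by push_cast; ring
        rw [this, PySem.List.pyGet?_natCast]
        simp only [List.getElem?_eq_none_iff]
        omega
      by_cases he : e = 1
      · exfalso
        have := h (k, e) (by simp [PySem.List.enumerate_cons]) he
        rw [hnone k le_rfl] at this
        simp at this
      · have hrest : x.drop (k + 1 + 2) = [] := by
          rw [List.drop_eq_nil_iff]; omega
        have := ih (k + 1) (by
          intro p hp hp2
          refine h p ?_ hp2
          rw [PySem.List.enumerate_cons]
          refine List.mem_cons_of_mem _ ?_
          exact_mod_cast hp)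
        rw [List.filter_cons]
        push_cast at this ⊢
        simp only [hrest] at this
        simpa [he] using this
    · -- x[k+2] exists and equals y
      have hy : PySem.List.pyGet? x ((k : Int) + 2) = some y := by
        have hcast : ((k : Int) + 2) = (((k + 2 : Nat)) : Int) := by push_cast; ring
        rw [hcast, PySem.List.pyGet?_natCast]
        have : x[(k+2)]? = (x.drop (k+2))[0]? := by
          rw [List.getElem?_drop]
        rw [this, hd]; rfl
      have hrest : x.drop (k + 1 + 2) = rest := by
        have : x.drop (k + 2 + 1) = (x.drop (k+2)).drop 1 := by
          rw [List.drop_drop]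
        rw [show k + 1 + 2 = k + 2 + 1 by ring, this, hd]
        simp
      have ihr := ih (k + 1) (by
        intro p hp hp2
        refine h p ?_ hp2
        rw [PySem.List.enumerate_cons]
        refine List.mem_cons_of_mem _ ?_
        exact_mod_cast hp)
      push_cast at ihr
      rw [hrest] at ihr
      rw [List.zip_cons_cons, List.filter_cons, List.filter_cons]
      by_cases he : e = 1
      · subst he
        simp only [show ((1:Int) == 1) = true by decide, if_true, List.map_cons, ihr]
        congr 1
        simp [pvToInt, pvParse, hy]
      · simp [he, ihr]

-- ===== VERDICT (by name: the statement is the Claim_ definition above) =====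
theorem map_rdd_spec : Claim_equal_map_rdd := by
  intro especie x _ hpre
  unfold Spec_map_rdd
  rw [mapA_eq, mapB_eq]
  have := core especie x 0 (by
    intro p hp hp2
    exact hpre.2 p (by simpa [PySem.List.enumerate] using hp) hp2)
  simp only [Nat.cast_zero, Nat.zero_add] at this
  rw [this]
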